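-- pv_equiv track=rewrite | github.com/jaikothari/AE-Advent-of-Code | week2/parabolic_dish.py | get_load_of_each_column
-- ===== SOURCE A (Python) =====
-- def get_load_of_each_column(rows, column, content):
--     locate_hash = 0
--     load = 0
--     while locate_hash < rows:
--         count = 0
--         while locate_hash < rows and content[locate_hash][column] == "#":
--             locate_hash += 1
--         start = locate_hash
--         while locate_hash < rows and content[locate_hash][column] != "#":
--             if content[locate_hash][column] == "O":
--                 count += 1
--             locate_hash += 1
--         load += sum(rows - value for value in range(start, start + count))
--     return (load)
-- ===== SOURCE B (Python) =====
-- def get_load_of_each_column(rows, column, content):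
--     next_free = 0
--     load = 0
--     for i in range(rows):
--         c = content[i][column]
--         if c == "#":
--             next_free = i + 1
--         elif c == "O":
--             load += rows - next_free
--             next_free += 1
--     return load
-- ===== Notes on version B (the rewrite author's own statement) =====
-- stated objective: simpler
-- what changed: Replaced A's outer sweep with three nested segment-scanning while-loops plus a range-sum per segment by one flat pass over the rows that maintains a running landing pointer next_free and adds rows - next_free as each rock is met.
import Mathlib
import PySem

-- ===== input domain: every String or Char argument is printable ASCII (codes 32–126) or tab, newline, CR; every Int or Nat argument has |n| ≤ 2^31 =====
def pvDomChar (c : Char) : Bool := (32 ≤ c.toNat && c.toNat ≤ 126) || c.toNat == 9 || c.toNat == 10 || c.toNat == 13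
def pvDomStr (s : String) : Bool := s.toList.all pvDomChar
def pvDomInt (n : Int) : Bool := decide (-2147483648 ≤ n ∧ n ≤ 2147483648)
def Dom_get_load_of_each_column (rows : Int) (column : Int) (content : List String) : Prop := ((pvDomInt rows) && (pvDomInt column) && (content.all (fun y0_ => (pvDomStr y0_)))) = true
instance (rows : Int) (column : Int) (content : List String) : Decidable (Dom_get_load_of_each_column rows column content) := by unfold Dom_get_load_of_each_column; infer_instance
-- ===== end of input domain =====

-- B replaces A's nested segment-scanning whiles by one flat pass over rows maintaining a
-- running landing pointer (objective: simpler).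


-- ===== PORT A =====
-- content[i][column] (both ports contain this very expression; none = IndexError, excluded by Pre_)
def cellAt (content : List String) (column i : Int) : Option Char :=
  (PySem.List.pyGet? content i).bind (fun s => PySem.Str.pyGet? s column)

-- while locate_hash < rows and content[locate_hash][column] == "#": locate_hash += 1
def skipHashA (rows column : Int) (content : List String) : Nat → Int → Int
  | 0, i => i
  | f+1, i =>
      if i < rows ∧ cellAt content column i = some '#' then
        skipHashA rows column content f (i+1)
      else i

-- while locate_hash < rows and content[locate_hash][column] != "#": (count 'O's) ; locate_hash += 1
def scanOpenA (rows column : Int) (content : List String) : Nat → Int → Int → Int × Int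
  | 0, i, count => (i, count)
  | f+1, i, count =>
      if i < rows ∧ cellAt content column i ≠ some '#' then
        scanOpenA rows column content f (i+1)
          (if cellAt content column i = some 'O' then count + 1 else count)
      else (i, count)

-- sum(rows - value for value in range(start, start + count))
def segSumA (rows start count : Int) : Int :=
  (PySem.List.pyRange start (start + count) 1).foldl (fun s v => s + (rows - v)) 0

-- while locate_hash < rows: … (fuel: each iteration advances locate_hash by ≥ 1)
def outerA (rows column : Int) (content : List String) : Nat → Int → Int → Int
  | 0, _, load => load
  | f+1, i, load =>
      if i < rows then
        let i1 := skipHashA rows column content (f+1) i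
        let p := scanOpenA rows column content (f+1) i1 0
        outerA rows column content f p.1 (load + segSumA rows i1 p.2)
      else load

def get_load_of_each_column (rows : Int) (column : Int) (content : List String) : Int :=
  outerA rows column content (rows.toNat + 1) 0 0

-- ===== PORT B =====
-- loop body of Source B: state = (next_free, load)
def bStep (rows column : Int) (content : List String) (st : Int × Int) (i : Int) : Int × Int :=
  match cellAt content column i with
  | some '#' => (i + 1, st.2)
  | some 'O' => (st.1 + 1, st.2 + (rows - st.1))
  | _ => st

def get_load_of_each_column_alt (rows : Int) (column : Int) (content : List String) : Int :=
  (((PySem.List.pyRange 0 rows 1).foldl (bStep rows column content) (0, 0)) : Int × Int).2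

-- ===== PRECONDITION & SPEC =====
-- Pre_ excludes exactly the inputs on which the Python A raises IndexError:
-- rows exceeding len(content), or an accessed row whose string index column is out of range.
def Pre_get_load_of_each_column (rows : Int) (column : Int) (content : List String) : Prop :=
  rows ≤ (content.length : Int) ∧
  ∀ s ∈ content.take rows.toNat, PySem.Raise.InRange s.toList.length column
instance (rows : Int) (column : Int) (content : List String) : Decidable (Pre_get_load_of_each_column rows column content) := by unfold Pre_get_load_of_each_column; infer_instance

def pvWitness_get_load_of_each_column : Int × Int × List String := (3, 0, ["O", ".", "O"])

def Spec_get_load_of_each_column (rows : Int) (column : Int) (content : List String) (out : Int) : Prop := out = get_load_of_each_column_alt rows column content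
instance (rows : Int) (column : Int) (content : List String) (out : Int) : Decidable (Spec_get_load_of_each_column rows column content out) := by unfold Spec_get_load_of_each_column; infer_instance

-- ===== CLAIM (what is proved, stated in full; the proofs are below) =====
def Claim_equal_get_load_of_each_column : Prop := ∀ (rows : Int) (column : Int) (content : List String), Dom_get_load_of_each_column rows column content → Pre_get_load_of_each_column rows column content → Spec_get_load_of_each_column rows column content (get_load_of_each_column rows column content)

-- ===== LEMMAS AND PROOFS =====

-- B's fold, parameterised by the start index; abbreviation used only in the proofs.
def bFold (rows column : Int) (content : List String) (i nf load : Int) : Int :=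
  (((PySem.List.pyRange i rows 1).foldl (bStep rows column content) (nf, load)) : Int × Int).2

lemma bFold_stop (rows column : Int) (content : List String) (i nf load : Int)
    (h : rows ≤ i) : bFold rows column content i nf load = load := by
  simp [bFold, PySem.List.pyRange_one_eq_nil h]

lemma bFold_cons (rows column : Int) (content : List String) (i nf load : Int)
    (h : i < rows) :
    bFold rows column content i nf load =
      (((PySem.List.pyRange (i+1) rows 1).foldl (bStep rows column content)
        (bStep rows column content (nf, load) i)) : Int × Int).2 := by
  simp [bFold, PySem.List.pyRange_one_cons h]

-- next_free is irrelevant at a '#' cell or past the end: B's first step there resets it.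
lemma bFold_nf_irrel (rows column : Int) (content : List String) (i nf nf' load : Int)
    (h : rows ≤ i ∨ cellAt content column i = some '#') :
    bFold rows column content i nf load = bFold rows column content i nf' load := by
  by_cases hi : i < rows
  · rcases h with h | h
    · omega
    · rw [bFold_cons _ _ _ _ _ _ hi, bFold_cons _ _ _ _ _ _ hi]
      simp [bStep, h]
  · rw [bFold_stop _ _ _ _ _ _ (by omega), bFold_stop _ _ _ _ _ _ (by omega)]

-- the pure sum  Σ_{k<c} (rows - (nf + k))
def pSum (rows nf : Int) : Nat → Int
  | 0 => 0
  | c+1 => (rows - nf) + pSum rows (nf+1) c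

lemma segSumA_eq_pSum (rows : Int) : ∀ (c : Nat) (start : Int),
    segSumA rows start (c : Int) = pSum rows start c := by
  intro c
  induction c with
  | zero =>
      intro start
      rw [segSumA, PySem.List.pyRange_one_eq_nil (by push_cast; omega)]
      simp [pSum]
  | succ c ih =>
      intro start
      have h : start < start + ((c : Int) + 1) := by omega
      rw [segSumA, show ((c+1 : Nat) : Int) = (c : Int) + 1 by push_cast; ring,
        PySem.List.pyRange_one_cons h]
      simp only [List.foldl_cons, zero_add]
      rw [PySem.List.foldl_add, pSum]
      have := ih (start + 1)
      rw [segSumA] at this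
      rw [PySem.List.foldl_add] at this
      have e : start + 1 + (c : Int) = start + ((c : Int) + 1) := by ring
      rw [e] at this
      omega

-- skipHashA: skipped cells are '#'; B's pass over them moves next_free to the new index.
lemma skip_spec (rows column : Int) (content : List String) :
    ∀ (f : Nat) (i : Int), (rows - i).toNat ≤ f →
      i ≤ skipHashA rows column content f i ∧
      (rows ≤ skipHashA rows column content f i ∨
        cellAt content column (skipHashA rows column content f i) ≠ some '#') ∧
      ∀ load, bFold rows column content i i load =
        bFold rows column content (skipHashA rows column content f i)
          (skipHashA rows column content f i) load := by
  intro f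
  induction f with
  | zero =>
      intro i hf
      have : rows ≤ i := by omega
      exact ⟨le_refl _, Or.inl this, fun _ => rfl⟩
  | succ f ih =>
      intro i hf
      by_cases hg : i < rows ∧ cellAt content column i = some '#'
      · have step : skipHashA rows column content (f+1) i
            = skipHashA rows column content f (i+1) := by
          rw [skipHashA]; simp [hg]
        obtain ⟨h1, h2, h3⟩ := ih (i+1) (by omega)
        refine ⟨by omega, by rw [step]; exact h2, fun load => ?_⟩
        rw [step, ← h3 load, bFold_cons _ _ _ _ _ _ hg.1]
        simp [bFold, bStep, hg.2]
      · have step : skipHashA rows column content (f+1) i = i := by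
          rw [skipHashA]; simp [hg]
        rw [step]
        refine ⟨le_refl _, ?_, fun _ => rfl⟩
        by_cases hi : i < rows
        · exact Or.inr (by tauto)
        · exact Or.inl (by omega)

-- the count accumulator of scanOpenA shifts out
lemma scan_shift (rows column : Int) (content : List String) :
    ∀ (f : Nat) (i c : Int),
      scanOpenA rows column content f i c =
        ((scanOpenA rows column content f i 0).1, c + (scanOpenA rows column content f i 0).2) := by
  intro f
  induction f with
  | zero => intro i c; simp [scanOpenA]
  | succ f ih =>
      intro i c
      rw [scanOpenA, scanOpenA]
      split_ifs with hg ho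
      · rw [ih (i+1) (c+1), ih (i+1) ((0:Int)+1)]
        simp only [Prod.mk.injEq, true_and]
        ring
      · exact ih (i+1) c
      · simp

-- scanOpenA over an open segment: B adds rows - next_free per rock, which telescopes to pSum.
lemma scan_spec (rows column : Int) (content : List String) :
    ∀ (f : Nat) (i : Int), (rows - i).toNat ≤ f →
      ∃ c : Nat,
        scanOpenA rows column content f i 0 = ((scanOpenA rows column content f i 0).1, (c : Int)) ∧
        i ≤ (scanOpenA rows column content f i 0).1 ∧
        (rows ≤ (scanOpenA rows column content f i 0).1 ∨
          cellAt content column (scanOpenA rows column content f i 0).1 = some '#') ∧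
        ((i < rows ∧ cellAt content column i ≠ some '#') →
          i + 1 ≤ (scanOpenA rows column content f i 0).1) ∧
        ∀ nf load, bFold rows column content i nf load =
          bFold rows column content (scanOpenA rows column content f i 0).1
            (nf + (c : Int)) (load + pSum rows nf c) := by
  intro f
  induction f with
  | zero =>
      intro i hf
      refine ⟨0, by simp [scanOpenA], le_refl _, Or.inl (by simp [scanOpenA]; omega),
        fun h => absurd h.1 (by omega), fun nf load => by simp [scanOpenA, pSum]⟩
  | succ f ih =>
      intro i hf
      by_cases hg : i < rows ∧ cellAt content column i ≠ some '#'
      · have step : scanOpenA rows column content (f+1) i 0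
            = scanOpenA rows column content f (i+1)
                (if cellAt content column i = some 'O' then (0:Int) + 1 else 0) := by
          rw [scanOpenA]; simp [hg]
        obtain ⟨c', hc', hle, hstop, _, hfold⟩ := ih (i+1) (by omega)
        by_cases ho : cellAt content column i = some 'O'
        · have step2 : scanOpenA rows column content (f+1) i 0
              = ((scanOpenA rows column content f (i+1) 0).1,
                 (0:Int) + 1 + (scanOpenA rows column content f (i+1) 0).2) := by
            rw [step, scan_shift rows column content f (i+1)]; simp [ho]
          refine ⟨c' + 1, ?_, by rw [step2]; simpa using by omega, ?_, ?_, ?_⟩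
          · rw [step2]
            have : (scanOpenA rows column content f (i+1) 0).2 = (c' : Int) := by
              rw [hc']
            rw [this]; push_cast; ring_nf
          · rw [step2]; simpa using hstop
          · intro _; rw [step2]; simpa using by omega
          · intro nf load
            rw [bFold_cons _ _ _ _ _ _ hg.1]
            have hb : bStep rows column content (nf, load) i = (nf + 1, load + (rows - nf)) := by
              simp [bStep, ho]
            rw [hb]
            have := hfold (nf + 1) (load + (rows - nf))
            rw [bFold] at this ⊢
            rw [this, step2]
            simp only [pSum]
            congr 1 <;> push_cast <;> ring
        · have step2 : scanOpenA rows column content (f+1) i 0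
              = scanOpenA rows column content f (i+1) 0 := by
            rw [step]; simp [ho]
          refine ⟨c', by rw [step2]; exact hc', by rw [step2]; omega,
            by rw [step2]; exact hstop, fun _ => by rw [step2]; omega, ?_⟩
          intro nf load
          rw [bFold_cons _ _ _ _ _ _ hg.1]
          have hb : bStep rows column content (nf, load) i = (nf, load) := by
            cases hcell : cellAt content column i with
            | none => simp [bStep, hcell]
            | some ch =>
                simp only [bStep, hcell]
                have h1 : ch ≠ '#' := by intro h; exact hg.2 (by rw [hcell, h])
                have h2 : ch ≠ 'O' := by intro h; exact ho (by rw [hcell, h])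
                simp [h1, h2]
          rw [hb, step2]
          exact hfold nf load
      · have step : scanOpenA rows column content (f+1) i 0 = (i, 0) := by
          rw [scanOpenA]; simp [hg]
        refine ⟨0, by rw [step]; simp, by rw [step], ?_, fun h => absurd h hg, ?_⟩
        · rw [step]
          by_cases hi : i < rows
          · exact Or.inr (by tauto)
          · exact Or.inl (by omega)
        · intro nf load; rw [step]; simp [pSum]

-- main invariant: A's outer loop from index i equals B's fold from i with next_free = i.
lemma main_inv (rows column : Int) (content : List String) :
    ∀ (f : Nat) (i load : Int), (rows - i).toNat ≤ f →
      outerA rows column content f i load = bFold rows column content i i load := by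
  intro f
  induction f with
  | zero =>
      intro i load hf
      rw [outerA, bFold_stop _ _ _ _ _ _ (by omega)]
  | succ f ih =>
      intro i load hf
      by_cases hi : i < rows
      · rw [outerA]
        simp only [hi, if_true]
        obtain ⟨hsk1, hsk2, hsk3⟩ := skip_spec rows column content (f+1) i hf
        set i1 := skipHashA rows column content (f+1) i with hi1
        obtain ⟨c, hc, hle, hstop, hprog, hfold⟩ :=
          scan_spec rows column content (f+1) i1 (by omega)
        set p := scanOpenA rows column content (f+1) i1 0 with hp
        have hfuel : (rows - p.1).toNat ≤ f := by
          by_cases h1 : rows ≤ i1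
          · omega
          · have hne : cellAt content column i1 ≠ some '#' := hsk2.resolve_left h1
            have := hprog ⟨by omega, hne⟩
            omega
        rw [ih p.1 _ hfuel]
        have h2 : p.2 = (c : Int) := by rw [hc]
        rw [h2, segSumA_eq_pSum rows c i1]
        rw [hsk3 load, hfold i1 load]
        exact (bFold_nf_irrel rows column content p.1 (i1 + (c:Int)) p.1 _ hstop).symm
      · rw [outerA]
        simp only [hi, if_false]
        rw [bFold_stop _ _ _ _ _ _ (by omega)]

-- ===== VERDICT (by name: the statement is the Claim_ definition above) =====
theorem get_load_of_each_column_spec : Claim_equal_get_load_of_each_column := by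
  intro rows column content _ _
  unfold Spec_get_load_of_each_column get_load_of_each_column get_load_of_each_column_alt
  rw [main_inv rows column content (rows.toNat + 1) 0 0 (by omega)]
  rfl
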